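-- pv_equiv track=rewrite | github.com/minghao51/qna-medical-referenced | src/ingestion/steps/download_web.py | _manifest_indexes
-- ===== SOURCE A (Python) =====
-- def _manifest_indexes(manifest: dict) -> tuple[dict[str, dict], dict[str, list[dict]]]:
--     records = manifest.get("records", [])
--     by_url = {str(r.get("normalized_url")): r for r in records if r.get("normalized_url")}
--     by_hash: dict[str, list[dict]] = {}
--     for r in records:
--         ch = r.get("content_hash")
--         if not ch:
--             continue
--         by_hash.setdefault(str(ch), []).append(r)
--     return by_url, by_hash
-- ===== SOURCE B (Python) =====
-- def _group_by(records, field):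
--     keys = dict.fromkeys(str(r.get(field)) for r in records if r.get(field))
--     return {k: [r for r in records if r.get(field) and str(r.get(field)) == k]
--             for k in keys}
--
--
-- def _manifest_indexes(manifest):
--     records = manifest.get("records", [])
--     by_url = {u: rs[-1] for u, rs in _group_by(records, "normalized_url").items()}
--     by_hash = _group_by(records, "content_hash")
--     return by_url, by_hash
-- ===== Notes on version B (the rewrite author's own statement) =====
-- stated objective: alternative
-- what changed: A builds the two indexes ad hoc in single passes (dict-comprehension overwrite for by_url, setdefault-append loop for by_hash); B factors the task through one generic grouping helper (ordered distinct keys via dict.fromkeys, then the matching records per key), returning the groups as by_hash and the last record of each group as by_url.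
import Mathlib
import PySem

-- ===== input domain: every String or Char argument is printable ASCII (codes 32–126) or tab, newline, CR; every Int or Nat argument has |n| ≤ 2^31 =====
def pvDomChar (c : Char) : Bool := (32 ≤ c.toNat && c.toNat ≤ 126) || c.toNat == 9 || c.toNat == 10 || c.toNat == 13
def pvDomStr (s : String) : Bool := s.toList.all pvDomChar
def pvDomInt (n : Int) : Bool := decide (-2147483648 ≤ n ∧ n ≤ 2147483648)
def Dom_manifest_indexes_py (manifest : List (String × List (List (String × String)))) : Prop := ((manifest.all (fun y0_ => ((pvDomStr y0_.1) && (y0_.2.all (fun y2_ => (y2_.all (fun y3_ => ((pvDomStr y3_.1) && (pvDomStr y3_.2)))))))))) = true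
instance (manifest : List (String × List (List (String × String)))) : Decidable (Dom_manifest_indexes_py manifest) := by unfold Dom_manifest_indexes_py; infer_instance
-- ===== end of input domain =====

-- B routes both indexes through one generic grouping helper (ordered distinct keys, then the
-- matching records per key); by_url keeps the last record of each group. Alternative decomposition, not faster.

-- ===== PORT A =====
-- r.get(k): first-match lookup on the record dict
def recGet (r : List (String × String)) (k : String) : Option String :=
  (PySem.Dict.mk r).get? k

-- literal port of A; str(v) is the identity here because record values are strings on this domain
def manifest_indexes_py (manifest : List (String × List (List (String × String)))) : (List (String × List (String × String))) × (List (String × List (List (String × String)))) :=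
  let records := (PySem.Dict.mk manifest).getD "records" []
  let by_url := records.foldl (fun d r =>
      match recGet r "normalized_url" with
      | some u => if u = "" then d else d.insert u r
      | none => d) PySem.Dict.empty
  let by_hash := records.foldl (fun d r =>
      match recGet r "content_hash" with
      | some h => if h = "" then d else d.modify h [] (fun g => g ++ [r])
      | none => d) PySem.Dict.empty
  (by_url.items, by_hash.items)

-- ===== PORT B =====
-- the generator 'str(r.get(field)) for r in records if r.get(field)' (str identity on this domain)
def keyStream (f : String) (records : List (List (String × String))) : List String :=
  records.filterMap (fun r =>
    match recGet r f with
    | some v => if v = "" then none else some v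
    | none => none)

-- _group_by: ordered distinct keys, then one filter pass per key
def groupByField (records : List (List (String × String))) (f : String) : PySem.Dict String (List (List (String × String))) :=
  let keys := PySem.List.dedup (keyStream f records)
  keys.foldl (fun d k =>
    d.insert k (records.filter (fun r =>
      match recGet r f with
      | some v => if v = "" then false else v == k
      | none => false))) PySem.Dict.empty

-- port of B: by_url = last record of each url group, by_hash = the hash groups
-- (rs[-1] via pyGet?; its 'none' branch is unreachable: every group is nonempty)
def manifest_indexes_py_alt (manifest : List (String × List (List (String × String)))) : (List (String × List (String × String))) × (List (String × List (List (String × String)))) :=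
  let records := (PySem.Dict.mk manifest).getD "records" []
  let by_url := (groupByField records "normalized_url").items.foldl (fun d p =>
      match PySem.List.pyGet? p.2 (-1) with
      | some r => d.insert p.1 r
      | none => d) PySem.Dict.empty
  let by_hash := groupByField records "content_hash"
  (by_url.items, by_hash.items)

-- ===== PRECONDITION & SPEC =====
def Spec_manifest_indexes_py (manifest : List (String × List (List (String × String)))) (out : (List (String × List (String × String))) × (List (String × List (List (String × String))))) : Prop := out = manifest_indexes_py_alt manifest
instance (manifest : List (String × List (List (String × String)))) (out : (List (String × List (String × String))) × (List (String × List (List (String × String))))) : Decidable (Spec_manifest_indexes_py manifest out) := by unfold Spec_manifest_indexes_py; infer_instance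

-- ===== CLAIM (what is proved, stated in full; the proofs are below) =====
def Claim_equal_manifest_indexes_py : Prop := ∀ (manifest : List (String × List (List (String × String)))), Dom_manifest_indexes_py manifest → Spec_manifest_indexes_py manifest (manifest_indexes_py manifest)

-- ===== LEMMAS AND PROOFS =====

-- the key A extracts from a record (None / "" filtered out)
def keyOf (f : String) (r : List (String × String)) : Option String :=
  match recGet r f with
  | some v => if v = "" then none else some v
  | none => none

-- (key, record) pairs of the records carrying a key
def pairsOf (f : String) (records : List (List (String × String))) : List (String × List (String × String)) :=
  records.filterMap (fun r => (keyOf f r).map (fun v => (v, r)))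

lemma keyStream_eq (f : String) (recs : List (List (String × String))) :
    keyStream f recs = recs.filterMap (keyOf f) := rfl

lemma keyOf_some_iff {f : String} {r : List (String × String)} {v : String} :
    keyOf f r = some v ↔ recGet r f = some v ∧ v ≠ "" := by
  unfold keyOf
  cases hg : recGet r f with
  | none => simp
  | some w =>
    by_cases hw : w = "" <;> simp [hw]; (intro h; simp [← h, hw])

lemma keyOf_none_iff {f : String} {r : List (String × String)} :
    keyOf f r = none ↔ recGet r f = none ∨ recGet r f = some "" := by
  unfold keyOf
  cases hg : recGet r f with
  | none => simp
  | some w => by_cases hw : w = "" <;> simp [hw]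

lemma pairs_map_fst (f : String) (recs : List (List (String × String))) :
    (pairsOf f recs).map Prod.fst = keyStream f recs := by
  induction recs with
  | nil => rfl
  | cons r recs ih =>
    simp only [pairsOf, keyStream_eq] at ih ⊢
    cases hk : keyOf f r <;> simp [hk, ih]

lemma mem_keyStream {f : String} {recs : List (List (String × String))} {u : String}
    (h : u ∈ keyStream f recs) : u ≠ "" ∧ ∃ r ∈ recs, recGet r f = some u := by
  rw [keyStream_eq] at h
  rcases List.mem_filterMap.mp h with ⟨r, hr, hk⟩
  rcases keyOf_some_iff.mp hk with ⟨hg, hu⟩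
  exact ⟨hu, r, hr, hg⟩

lemma pairs_filter_snd (f : String) (recs : List (List (String × String))) {c : String} (hc : c ≠ "") :
    ((pairsOf f recs).filter (fun p => p.1 == c)).map Prod.snd
      = recs.filter (fun r => recGet r f == some c) := by
  induction recs with
  | nil => rfl
  | cons r recs ih =>
    simp only [pairsOf] at ih ⊢
    cases hk : keyOf f r with
    | none =>
      have hpred : (recGet r f == some c) = false := by
        rcases keyOf_none_iff.mp hk with hg | hg <;> simp [hg, Ne.symm hc]
      simp [hk, hpred, ih]
    | some v =>
      rcases keyOf_some_iff.mp hk with ⟨hg, hv⟩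
      by_cases hvc : v = c
      · subst hvc
        simp [hk, hg, ih]
      · simp [hk, hg, hvc, ih]

-- B's per-key filter condition agrees with the canonical one for a nonempty key
lemma filter_pred_eq (f : String) (recs : List (List (String × String))) {k : String} (hk : k ≠ "") :
    recs.filter (fun r =>
        match recGet r f with
        | some v => if v = "" then false else v == k
        | none => false)
      = recs.filter (fun r => recGet r f == some k) := by
  apply List.filter_congr
  intro r _
  cases hg : recGet r f with
  | none => simp
  | some v =>
    by_cases hv : v = ""
    · subst hv; simp [Ne.symm hk]
    · simp [hv]

-- items of B's grouping helper, in canonical form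
lemma groupBy_items (recs : List (List (String × String))) (f : String) :
    (groupByField recs f).items
      = (PySem.Set.ofList (keyStream f recs)).map
          (fun k => (k, recs.filter (fun r => recGet r f == some k))) := by
  unfold groupByField
  rw [PySem.List.dedup_eq_ofList,
    PySem.Dict.items_foldl_insert_fresh _ (fun k => k) _ PySem.Dict.empty
      (fun a _ => PySem.Dict.contains_empty a)
      (by simp [PySem.Set.nodup_ofList])]
  have hempty : (PySem.Dict.empty : PySem.Dict String (List (List (String × String)))).items = [] := rfl
  rw [hempty, List.nil_append]
  apply List.map_congr_left
  intro k hkmem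
  have hk : k ≠ "" := (mem_keyStream ((PySem.Set.mem_ofList _ _).mp hkmem)).1
  rw [filter_pred_eq f recs hk]

lemma hash_fold_eq (recs : List (List (String × String))) (d : PySem.Dict String (List (List (String × String)))) :
    recs.foldl (fun d r =>
        match recGet r "content_hash" with
        | some h => if h = "" then d else d.modify h [] (fun g => g ++ [r])
        | none => d) d
      = (pairsOf "content_hash" recs).foldl (fun d p => d.modify p.1 [] (fun g => g ++ [p.2])) d := by
  induction recs generalizing d with
  | nil => rfl
  | cons r recs ih =>
    simp only [pairsOf, List.foldl_cons] at ih ⊢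
    cases hg : recGet r "content_hash" with
    | none =>
      have hk : keyOf "content_hash" r = none := keyOf_none_iff.mpr (Or.inl hg)
      simp [hk, ih]
    | some v =>
      by_cases hv : v = ""
      · have hk : keyOf "content_hash" r = none := keyOf_none_iff.mpr (Or.inr (hv ▸ hg))
        simp [hk, hv, ih]
      · have hk : keyOf "content_hash" r = some v := keyOf_some_iff.mpr ⟨hg, hv⟩
        simp [hk, hv, ih]

lemma url_fold_eq (recs : List (List (String × String))) (d : PySem.Dict String (List (String × String))) :
    recs.foldl (fun d r =>
        match recGet r "normalized_url" with
        | some u => if u = "" then d else d.insert u r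
        | none => d) d
      = (pairsOf "normalized_url" recs).foldl (fun d p => d.insert p.1 p.2) d := by
  induction recs generalizing d with
  | nil => rfl
  | cons r recs ih =>
    simp only [pairsOf, List.foldl_cons] at ih ⊢
    cases hg : recGet r "normalized_url" with
    | none =>
      have hk : keyOf "normalized_url" r = none := keyOf_none_iff.mpr (Or.inl hg)
      simp [hk, ih]
    | some v =>
      by_cases hv : v = ""
      · have hk : keyOf "normalized_url" r = none := keyOf_none_iff.mpr (Or.inr (hv ▸ hg))
        simp [hk, hv, ih]
      · have hk : keyOf "normalized_url" r = some v := keyOf_some_iff.mpr ⟨hg, hv⟩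
        simp [hk, hv, ih]

lemma get?_foldl_insert (P : List (String × List (String × String))) (d : PySem.Dict String (List (String × String))) (c : String) :
    (P.foldl (fun d p => d.insert p.1 p.2) d).get? c
      = match (P.filter (fun p => p.1 == c)).getLast? with
        | some p => some p.2
        | none => d.get? c := by
  induction P generalizing d with
  | nil => rfl
  | cons p P ih =>
    simp only [List.foldl_cons, List.filter_cons]
    by_cases hpc : p.1 = c
    · simp only [hpc, beq_self_eq_true, if_true]
      rw [ih]
      cases hl : (P.filter (fun p => p.1 == c)).getLast? with
      | some q => simp [List.getLast?_cons, hl]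
      | none =>
        have : P.filter (fun p => p.1 == c) = [] := by
          cases hP : P.filter (fun p => p.1 == c) with
          | nil => rfl
          | cons a l => rw [hP] at hl; simp at hl
        simp [this, PySem.Dict.get?_insert_self]
    · simp only [beq_iff_eq, hpc, if_false]
      rw [ih]
      cases hl : (P.filter (fun p => p.1 == c)).getLast? with
      | some q => simp
      | none => simp [PySem.Dict.get?_insert_of_ne d p.2 (Ne.symm hpc)]

-- A's by_hash items, in the same canonical form as groupBy_items
lemma hash_items_map (recs : List (List (String × String))) :
    (recs.foldl (fun d r =>
        match recGet r "content_hash" with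
        | some h => if h = "" then d else d.modify h [] (fun g => g ++ [r])
        | none => d) PySem.Dict.empty).items
      = (PySem.Set.ofList (keyStream "content_hash" recs)).map
          (fun c => (c, recs.filter (fun r => recGet r "content_hash" == some c))) := by
  rw [hash_fold_eq]
  have hnd : ((pairsOf "content_hash" recs).foldl (fun d p => d.modify p.1 [] (fun g => g ++ [p.2])) PySem.Dict.empty).keys.Nodup :=
    PySem.Dict.nodup_keys_foldl_modify_key (pairsOf "content_hash" recs) Prod.fst [] (fun _ p v => v ++ [p.2]) PySem.Dict.empty PySem.Dict.nodup_keys_empty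
  have hkeys : ((pairsOf "content_hash" recs).foldl (fun d p => d.modify p.1 [] (fun g => g ++ [p.2])) PySem.Dict.empty).keys
      = PySem.Set.ofList (keyStream "content_hash" recs) := by
    rw [PySem.Dict.keys_foldl_modify_key (pairsOf "content_hash" recs) Prod.fst [] (fun _ p v => v ++ [p.2]),
      PySem.Dict.keys_empty, PySem.Set.update_nil_left, pairs_map_fst]
  rw [PySem.Dict.items_eq_map_keys _ hnd [], hkeys]
  apply List.map_congr_left
  intro c hc
  have hc' : c ≠ "" := (mem_keyStream ((PySem.Set.mem_ofList _ _).mp hc)).1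
  rw [PySem.Dict.getD_foldl_modify_append, PySem.Dict.getD_empty, List.nil_append,
    pairs_filter_snd _ _ hc']

-- A's by_url items: last matching record per distinct url, first-occurrence order
lemma url_items_map (recs : List (List (String × String))) :
    (recs.foldl (fun d r =>
        match recGet r "normalized_url" with
        | some u => if u = "" then d else d.insert u r
        | none => d) PySem.Dict.empty).items
      = (PySem.Set.ofList (keyStream "normalized_url" recs)).map
          (fun u => (u, ((recs.filter (fun r => recGet r "normalized_url" == some u)).getLast?).getD [])) := by
  rw [url_fold_eq]
  have hnd : ((pairsOf "normalized_url" recs).foldl (fun d p => d.insert p.1 p.2) PySem.Dict.empty).keys.Nodup :=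
    PySem.Dict.nodup_keys_foldl_insert_key (pairsOf "normalized_url" recs) Prod.fst (fun _ p => p.2) PySem.Dict.empty PySem.Dict.nodup_keys_empty
  have hkeys : ((pairsOf "normalized_url" recs).foldl (fun d p => d.insert p.1 p.2) PySem.Dict.empty).keys
      = PySem.Set.ofList (keyStream "normalized_url" recs) := by
    rw [PySem.Dict.keys_foldl_insert_key (pairsOf "normalized_url" recs) Prod.fst (fun _ p => p.2),
      PySem.Dict.keys_empty, PySem.Set.update_nil_left, pairs_map_fst]
  rw [PySem.Dict.items_eq_map_keys _ hnd [], hkeys]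
  apply List.map_congr_left
  intro u hu
  have hu' : u ≠ "" := (mem_keyStream ((PySem.Set.mem_ofList _ _).mp hu)).1
  refine congrArg (fun x => (u, x)) ?_
  have h2 : (recs.filter (fun r => recGet r "normalized_url" == some u)).getLast?
      = ((pairsOf "normalized_url" recs).filter (fun p => p.1 == u)).getLast?.map Prod.snd := by
    rw [← pairs_filter_snd _ _ hu', List.getLast?_map]
  rw [PySem.Dict.getD_eq_get?_getD, get?_foldl_insert, h2]
  cases hl : ((pairsOf "normalized_url" recs).filter (fun p => p.1 == u)).getLast? with
  | none => simp [PySem.Dict.get?_empty]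
  | some q => simp

-- B's by_url items coincide with A's
lemma url_items_alt (recs : List (List (String × String))) :
    ((groupByField recs "normalized_url").items.foldl (fun d p =>
        match PySem.List.pyGet? p.2 (-1) with
        | some r => d.insert p.1 r
        | none => d) PySem.Dict.empty).items
      = (PySem.Set.ofList (keyStream "normalized_url" recs)).map
          (fun u => (u, ((recs.filter (fun r => recGet r "normalized_url" == some u)).getLast?).getD [])) := by
  rw [groupBy_items]
  have hstep : ∀ (d : PySem.Dict String (List (String × String))),
      ∀ p ∈ (PySem.Set.ofList (keyStream "normalized_url" recs)).map
          (fun k => (k, recs.filter (fun r => recGet r "normalized_url" == some k))),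
      (match PySem.List.pyGet? p.2 (-1) with
        | some r => d.insert p.1 r
        | none => d)
      = d.insert p.1 (p.2.getLast?.getD []) := by
    intro d p hp
    rcases List.mem_map.mp hp with ⟨u, hu, rfl⟩
    rcases mem_keyStream ((PySem.Set.mem_ofList _ _).mp hu) with ⟨-, r, hr, hg⟩
    have hmem : r ∈ recs.filter (fun r => recGet r "normalized_url" == some u) :=
      List.mem_filter.mpr ⟨hr, by simp [hg]⟩
    rw [PySem.List.pyGet?_neg_one]
    cases hl : (recs.filter (fun r => recGet r "normalized_url" == some u)).getLast? with
    | none => exact absurd (List.getLast?_eq_none_iff.mp hl) (List.ne_nil_of_mem hmem)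
    | some r0 => simp
  have hfst : ((PySem.Set.ofList (keyStream "normalized_url" recs)).map
        (fun k => (k, recs.filter (fun r => recGet r "normalized_url" == some k)))).map Prod.fst
      = PySem.Set.ofList (keyStream "normalized_url" recs) := by
    simp [List.map_map, Function.comp_def]
  rw [PySem.List.foldl_congr_mem _ _ _ PySem.Dict.empty (fun d p hp => hstep d p hp),
    PySem.Dict.items_foldl_insert_fresh
      ((PySem.Set.ofList (keyStream "normalized_url" recs)).map
        (fun k => (k, recs.filter (fun r => recGet r "normalized_url" == some k))))
      Prod.fst (fun p => p.2.getLast?.getD []) PySem.Dict.empty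
      (fun a _ => PySem.Dict.contains_empty (ν := List (String × String)) a)
      (by rw [hfst]; exact PySem.Set.nodup_ofList _)]
  have hempty : (PySem.Dict.empty : PySem.Dict String (List (String × String))).items = [] := rfl
  rw [hempty, List.nil_append, List.map_map]
  rfl

-- ===== VERDICT (by name: the statement is the Claim_ definition above) =====
theorem manifest_indexes_py_spec : Claim_equal_manifest_indexes_py := by
  intro manifest _
  unfold Spec_manifest_indexes_py manifest_indexes_py manifest_indexes_py_alt
  refine congrArg₂ Prod.mk ?_ ?_
  · rw [url_items_map, url_items_alt]
  · rw [hash_items_map, groupBy_items]
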